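-- pv_equiv track=rewrite | github.com/svenons/MineFinder | PathFinder/controllers/smart_controller.py | _build_backtrack_path
-- ===== SOURCE A (Python) =====
-- def _build_backtrack_path(start, end):
--     """Create a simple Manhattan path from the mine back to the last safe tile."""
--     if not start or not end:
--         return []
--     path = [start]
--     current = start
--     while current != end:
--         cx, cy = current
--         tx, ty = end
--         if cx < tx:
--             current = (cx + 1, cy)
--         elif cx > tx:
--             current = (cx - 1, cy)
--         elif cy < ty:
--             current = (cx, cy + 1)
--         else:
--             current = (cx, cy - 1)
--         path.append(current)
--     return path
-- ===== SOURCE B (Python) =====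
-- def _build_backtrack_path(start, end):
--     """Create a simple Manhattan path from the mine back to the last safe tile."""
--     if not start or not end:
--         return []
--     sx, sy = start
--     tx, ty = end
--     dx = 1 if tx > sx else -1
--     dy = 1 if ty > sy else -1
--     path = [start]
--     path += [(sx + dx * i, sy) for i in range(1, abs(tx - sx) + 1)]
--     path += [(tx, sy + dy * j) for j in range(1, abs(ty - sy) + 1)]
--     return path
-- ===== Notes on version B (the rewrite author's own statement) =====
-- stated objective: simpler
-- what changed: Replaces A's step-until-equal while loop over a mutable current tile with two closed counted comprehensions (the x-segment then the y-segment) appended to [start].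
import Mathlib
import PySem

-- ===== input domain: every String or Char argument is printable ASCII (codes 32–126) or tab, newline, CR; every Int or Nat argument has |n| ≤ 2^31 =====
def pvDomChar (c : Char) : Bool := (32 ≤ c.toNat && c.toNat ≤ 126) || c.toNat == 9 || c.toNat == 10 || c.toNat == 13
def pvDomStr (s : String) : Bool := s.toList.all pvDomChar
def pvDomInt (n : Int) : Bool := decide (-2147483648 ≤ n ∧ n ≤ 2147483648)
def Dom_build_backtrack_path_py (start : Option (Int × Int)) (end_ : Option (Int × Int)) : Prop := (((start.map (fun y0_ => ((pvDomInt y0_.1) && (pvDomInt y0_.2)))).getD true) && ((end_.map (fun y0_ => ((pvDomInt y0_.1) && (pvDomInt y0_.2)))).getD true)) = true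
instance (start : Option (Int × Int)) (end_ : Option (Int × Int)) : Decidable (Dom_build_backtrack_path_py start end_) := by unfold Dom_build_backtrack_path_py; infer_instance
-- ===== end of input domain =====

-- B replaces A's step-until-equal while loop over a mutable current tile with two
-- counted comprehensions (x-segment then y-segment) appended to [start]; objective: simpler.

-- ===== PORT A =====
-- one iteration of A's while-loop body: the next value of `current`
def pvStep (c t : Int × Int) : Int × Int :=
  if c.1 < t.1 then (c.1 + 1, c.2)
  else if c.1 > t.1 then (c.1 - 1, c.2)
  else if c.2 < t.2 then (c.1, c.2 + 1)
  else (c.1, c.2 - 1)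

-- A's while loop (the tiles appended after `current`), with a fuel guard for totality only:
-- the loop runs exactly |c.1-t.1| + |c.2-t.2| times, so the fuel below never runs out
def pvALoopF : Nat → (Int × Int) → (Int × Int) → List (Int × Int)
  | 0, _, _ => []
  | n + 1, c, t =>
    if c = t then []
    else
      let c' := pvStep c t
      c' :: pvALoopF n c' t

def pvALoop (c t : Int × Int) : List (Int × Int) :=
  pvALoopF ((c.1 - t.1).natAbs + (c.2 - t.2).natAbs) c t

def build_backtrack_path_py (start : Option (Int × Int)) (end_ : Option (Int × Int)) : List (Int × Int) :=
  match start, end_ with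
  | some s, some e => s :: pvALoop s e
  | _, _ => []

-- ===== PORT B =====
def build_backtrack_path_py_alt (start : Option (Int × Int)) (end_ : Option (Int × Int)) : List (Int × Int) :=
  match start with
  | none => []
  | some (sx, sy) =>
    match end_ with
    | none => []
    | some (tx, ty) =>
      let dx : Int := if tx > sx then 1 else -1
      let dy : Int := if ty > sy then 1 else -1
      (((sx, sy) :: (PySem.List.pyRange 1 (((tx - sx).natAbs : Int) + 1) 1).map (fun i => (sx + dx * i, sy)))
        ++ (PySem.List.pyRange 1 (((ty - sy).natAbs : Int) + 1) 1).map (fun j => (tx, sy + dy * j)))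

-- ===== PRECONDITION & SPEC =====
def Spec_build_backtrack_path_py (start : Option (Int × Int)) (end_ : Option (Int × Int)) (out : List (Int × Int)) : Prop := out = build_backtrack_path_py_alt start end_
instance (start : Option (Int × Int)) (end_ : Option (Int × Int)) (out : List (Int × Int)) : Decidable (Spec_build_backtrack_path_py start end_ out) := by unfold Spec_build_backtrack_path_py; infer_instance

-- ===== CLAIM (what is proved, stated in full; the proofs are below) =====
def Claim_equal_build_backtrack_path_py : Prop := ∀ (start : Option (Int × Int)) (end_ : Option (Int × Int)), Dom_build_backtrack_path_py start end_ → Spec_build_backtrack_path_py start end_ (build_backtrack_path_py start end_)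

-- ===== LEMMAS AND PROOFS =====

-- y-phase of A's loop, moving up
lemma pvALoopF_y_up (n : Nat) : ∀ (tx sy ty : Int), ty - sy = n →
    pvALoopF n (tx, sy) (tx, ty) = (List.range n).map (fun k : Nat => (tx, sy + (k : Int) + 1)) := by
  induction n with
  | zero => intro tx sy ty h; simp [pvALoopF]
  | succ n ih =>
    intro tx sy ty h
    have hlt : sy < ty := by omega
    rw [pvALoopF, if_neg (by simp [Prod.ext_iff]; omega)]
    simp only [pvStep, lt_self_iff_false, if_false, if_pos hlt]
    rw [ih tx (sy + 1) ty (by omega), List.range_succ_eq_map]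
    simp only [List.map_cons, List.map_map]
    refine congrArg₂ _ (by norm_num) ?_
    apply List.map_congr_left; intro k _
    simp only [Function.comp_apply, Prod.mk.injEq, true_and]
    push_cast; ring

-- y-phase of A's loop, moving down
lemma pvALoopF_y_down (n : Nat) : ∀ (tx sy ty : Int), sy - ty = n →
    pvALoopF n (tx, sy) (tx, ty) = (List.range n).map (fun k : Nat => (tx, sy - (k : Int) - 1)) := by
  induction n with
  | zero => intro tx sy ty h; simp [pvALoopF]
  | succ n ih =>
    intro tx sy ty h
    have hgt : ty < sy := by omega
    rw [pvALoopF, if_neg (by simp [Prod.ext_iff]; omega)]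
    simp only [pvStep, lt_self_iff_false, if_false, if_neg (show ¬ sy < ty by omega)]
    rw [ih tx (sy - 1) ty (by omega), List.range_succ_eq_map]
    simp only [List.map_cons, List.map_map]
    refine congrArg₂ _ (by norm_num) ?_
    apply List.map_congr_left; intro k _
    simp only [Function.comp_apply, Prod.mk.injEq, true_and]
    push_cast; ring

-- x-phase of A's loop, moving right; afterwards the y-phase runs from (tx, sy) on the rest of the fuel
lemma pvALoopF_x_right (n : Nat) : ∀ (m : Nat) (sx sy tx ty : Int), tx - sx = n →
    pvALoopF (n + m) (sx, sy) (tx, ty) =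
      (List.range n).map (fun k : Nat => (sx + (k : Int) + 1, sy)) ++ pvALoopF m (tx, sy) (tx, ty) := by
  induction n with
  | zero =>
    intro m sx sy tx ty h
    have : sx = tx := by omega
    subst this; simp
  | succ n ih =>
    intro m sx sy tx ty h
    have hlt : sx < tx := by omega
    rw [show n + 1 + m = (n + m) + 1 by omega]
    rw [pvALoopF, if_neg (by simp [Prod.ext_iff]; omega)]
    simp only [pvStep, if_pos hlt]
    rw [ih m (sx + 1) sy tx ty (by omega), List.range_succ_eq_map]
    simp only [List.map_cons, List.map_map, List.cons_append]
    refine congrArg₂ _ (by norm_num) ?_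
    refine congrArg₂ _ ?_ rfl
    apply List.map_congr_left; intro k _
    simp only [Function.comp_apply, Prod.mk.injEq, and_true]
    push_cast; ring

-- x-phase of A's loop, moving left
lemma pvALoopF_x_left (n : Nat) : ∀ (m : Nat) (sx sy tx ty : Int), sx - tx = n →
    pvALoopF (n + m) (sx, sy) (tx, ty) =
      (List.range n).map (fun k : Nat => (sx - (k : Int) - 1, sy)) ++ pvALoopF m (tx, sy) (tx, ty) := by
  induction n with
  | zero =>
    intro m sx sy tx ty h
    have : sx = tx := by omega
    subst this; simp
  | succ n ih =>
    intro m sx sy tx ty h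
    have hgt : tx < sx := by omega
    rw [show n + 1 + m = (n + m) + 1 by omega]
    rw [pvALoopF, if_neg (by simp [Prod.ext_iff]; omega)]
    simp only [pvStep, if_neg (show ¬ sx < tx by omega), if_pos hgt]
    rw [ih m (sx - 1) sy tx ty (by omega), List.range_succ_eq_map]
    simp only [List.map_cons, List.map_map, List.cons_append]
    refine congrArg₂ _ (by norm_num) ?_
    refine congrArg₂ _ ?_ rfl
    apply List.map_congr_left; intro k _
    simp only [Function.comp_apply, Prod.mk.injEq, and_true]
    push_cast; ring

-- B's comprehension over range(1, n+1) as a List.range map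
lemma pvRange_map (f : Int → Int × Int) (n : Nat) :
    (PySem.List.pyRange 1 ((n : Int) + 1) 1).map f = (List.range n).map (fun k : Nat => f ((k : Int) + 1)) := by
  rw [PySem.List.pyRange_one]
  rw [show ((n : Int) + 1 - 1).toNat = n by omega, List.map_map]
  apply List.map_congr_left; intro k _
  simp only [Function.comp]
  rw [add_comm]

-- ===== VERDICT (by name: the statement is the Claim_ definition above) =====
theorem build_backtrack_path_py_spec : Claim_equal_build_backtrack_path_py := by
  intro start end_ _
  unfold Spec_build_backtrack_path_py
  match start, end_ with
  | none, none => rfl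
  | none, some _ => rfl
  | some _, none => rfl
  | some (sx, sy), some (tx, ty) =>
    show (sx, sy) :: pvALoop (sx, sy) (tx, ty) = _
    unfold build_backtrack_path_py_alt
    simp only [pvRange_map, List.cons_append]
    unfold pvALoop
    rw [show ((sx, sy).1 - (tx, ty).1).natAbs = (tx - sx).natAbs by simp; omega,
        show ((sx, sy).2 - (tx, ty).2).natAbs = (ty - sy).natAbs by simp; omega]
    have hy : pvALoopF ((ty - sy).natAbs) (tx, sy) (tx, ty)
        = (List.range (ty - sy).natAbs).map
            (fun k : Nat => (tx, sy + (if ty > sy then (1:Int) else -1) * ((k : Int) + 1))) := by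
      by_cases hc : sy < ty
      · rw [pvALoopF_y_up (ty - sy).natAbs tx sy ty (by omega)]
        apply List.map_congr_left; intro k _
        rw [if_pos hc]; simp [Prod.ext_iff]; ring
      · rw [show (ty - sy).natAbs = (sy - ty).natAbs by omega,
            pvALoopF_y_down (sy - ty).natAbs tx sy ty (by omega)]
        apply List.map_congr_left; intro k _
        rw [if_neg (by omega)]; simp [Prod.ext_iff]; ring
    refine congrArg₂ _ rfl ?_
    by_cases hx : sx < tx
    · rw [pvALoopF_x_right (tx - sx).natAbs (ty - sy).natAbs sx sy tx ty (by omega), hy]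
      refine congrArg₂ _ ?_ rfl
      apply List.map_congr_left; intro k _
      rw [if_pos hx]; simp [Prod.ext_iff]; ring
    · rw [show (tx - sx).natAbs = (sx - tx).natAbs by omega,
          pvALoopF_x_left (sx - tx).natAbs (ty - sy).natAbs sx sy tx ty (by omega), hy]
      refine congrArg₂ _ ?_ rfl
      apply List.map_congr_left; intro k _
      rw [if_neg (by omega)]; simp [Prod.ext_iff]; ring
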